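-- pv_equiv track=rewrite | github.com/statehouse-dev/statehouse | tutorials/01-resumable-research-agent/tools.py | search
-- ===== SOURCE A (Python) =====
-- from typing import List, Any
--
-- def search(query: str) -> List[str]:
--     """
--     Mock search tool - returns fixed results.
--
--     Args:
--         query: Search query
--
--     Returns:
--         List of search result strings
--     """
--     # Deterministic mock results based on query content
--     query_lower = query.lower()
--
--     if "raft" in query_lower:
--         return [
--             "Raft: A consensus algorithm designed for understandability",
--             "Raft vs Paxos: comparison of consensus protocols",
--             "Raft implementation in etcd and Consul",
--         ]
--
--     elif "paxos" in query_lower: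
--         return [
--             "Paxos: The classic consensus algorithm",
--             "Understanding Paxos with simple examples",
--         ]
--
--     elif "statehouse" in query_lower:
--         return [
--             "Statehouse: strongly consistent state for agents",
--             "Statehouse provides deterministic replay and crash recovery",
--         ]
--
--     elif "rust" in query_lower:
--         return [
--             "Rust programming language: memory safety without garbage collection",
--             "Rust in production: performance and reliability",
--         ]
--
--     elif any(word in query_lower for word in ["python", "code", "programming"]):
--         return [
--             "Python: high-level programming for rapid development",
--             "Python for AI: popular frameworks and libraries",
--         ]
--
--     else:
--         # Generic results
--         return [
--             f"Result 1 for query: {query[:50]}",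
--             f"Result 2 for query: {query[:50]}",
--         ]
-- ===== SOURCE B (Python) =====
-- from typing import List, Any
--
-- KEYWORDS = ["raft", "paxos", "statehouse", "rust", "python", "code", "programming"]
--
-- RESULTS = {
--     "raft": [
--         "Raft: A consensus algorithm designed for understandability",
--         "Raft vs Paxos: comparison of consensus protocols",
--         "Raft implementation in etcd and Consul",
--     ],
--     "paxos": [
--         "Paxos: The classic consensus algorithm",
--         "Understanding Paxos with simple examples",
--     ],
--     "statehouse": [
--         "Statehouse: strongly consistent state for agents",
--         "Statehouse provides deterministic replay and crash recovery",
--     ],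
--     "rust": [
--         "Rust programming language: memory safety without garbage collection",
--         "Rust in production: performance and reliability",
--     ],
--     "python": [
--         "Python: high-level programming for rapid development",
--         "Python for AI: popular frameworks and libraries",
--     ],
--     "code": [
--         "Python: high-level programming for rapid development",
--         "Python for AI: popular frameworks and libraries",
--     ],
--     "programming": [
--         "Python: high-level programming for rapid development",
--         "Python for AI: popular frameworks and libraries",
--     ],
-- }
--
-- def search(query: str) -> List[str]:
--     # Single left-to-right scan of the lowered query: at each position record
--     # every keyword that starts there (a multi-pattern position scan), then
--     # return the results of the highest-priority matched keyword.
--     q = query.lower()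
--     matched = set()
--     for i in range(len(q)):
--         for kw in KEYWORDS:
--             if q.startswith(kw, i):
--                 matched.add(kw)
--     for kw in KEYWORDS:
--         if kw in matched:
--             return RESULTS[kw]
--     return [
--         f"Result 1 for query: {query[:50]}",
--         f"Result 2 for query: {query[:50]}",
--     ]
-- ===== Notes on version B (the rewrite author's own statement) =====
-- stated objective: alternative
-- what changed: Replaces the if/elif chain of per-keyword substring tests by a single left-to-right position scan of the query that collects the set of all keywords matching at each position, followed by a priority lookup into a keyword->results map.
import Mathlib
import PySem

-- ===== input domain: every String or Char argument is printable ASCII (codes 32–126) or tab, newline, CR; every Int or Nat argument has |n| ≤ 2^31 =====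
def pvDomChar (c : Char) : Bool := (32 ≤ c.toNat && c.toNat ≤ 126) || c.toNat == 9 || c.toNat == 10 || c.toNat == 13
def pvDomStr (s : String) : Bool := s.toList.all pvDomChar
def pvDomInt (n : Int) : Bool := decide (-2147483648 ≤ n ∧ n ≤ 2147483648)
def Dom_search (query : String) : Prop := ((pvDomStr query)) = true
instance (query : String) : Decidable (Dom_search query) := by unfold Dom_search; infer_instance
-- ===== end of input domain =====

-- B replaces A's if/elif substring tests by one left-to-right position scan collecting the matched-keyword set, then a priority lookup (alternative decomposition, same cost class).


-- ===== PORT A =====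
-- Literal port of A: lowercase once, then an if/elif chain of substring tests.
def search (query : String) : List String :=
  let query_lower := PySem.Str.lower query
  if PySem.Str.isIn "raft" query_lower then
    ["Raft: A consensus algorithm designed for understandability",
     "Raft vs Paxos: comparison of consensus protocols",
     "Raft implementation in etcd and Consul"]
  else if PySem.Str.isIn "paxos" query_lower then
    ["Paxos: The classic consensus algorithm",
     "Understanding Paxos with simple examples"]
  else if PySem.Str.isIn "statehouse" query_lower then
    ["Statehouse: strongly consistent state for agents",
     "Statehouse provides deterministic replay and crash recovery"]
  else if PySem.Str.isIn "rust" query_lower then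
    ["Rust programming language: memory safety without garbage collection",
     "Rust in production: performance and reliability"]
  else if (["python", "code", "programming"].any fun word => PySem.Str.isIn word query_lower) then
    ["Python: high-level programming for rapid development",
     "Python for AI: popular frameworks and libraries"]
  else
    ["Result 1 for query: " ++ PySem.Str.slice query none (some 50),
     "Result 2 for query: " ++ PySem.Str.slice query none (some 50)]

-- ===== PORT B =====
-- B's priority-ordered keyword list and keyword -> results dict.
def searchKeywords : List String :=
  ["raft", "paxos", "statehouse", "rust", "python", "code", "programming"]

def searchResults : PySem.Dict String (List String) :=
  PySem.Dict.ofList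
    [("raft",
      ["Raft: A consensus algorithm designed for understandability",
       "Raft vs Paxos: comparison of consensus protocols",
       "Raft implementation in etcd and Consul"]),
     ("paxos",
      ["Paxos: The classic consensus algorithm",
       "Understanding Paxos with simple examples"]),
     ("statehouse",
      ["Statehouse: strongly consistent state for agents",
       "Statehouse provides deterministic replay and crash recovery"]),
     ("rust",
      ["Rust programming language: memory safety without garbage collection",
       "Rust in production: performance and reliability"]),
     ("python",
      ["Python: high-level programming for rapid development",
       "Python for AI: popular frameworks and libraries"]),
     ("code",
      ["Python: high-level programming for rapid development",
       "Python for AI: popular frameworks and libraries"]),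
     ("programming",
      ["Python: high-level programming for rapid development",
       "Python for AI: popular frameworks and libraries"])]

-- B's second loop: first keyword (in priority order) that is in the matched set;
-- every kw ∈ searchKeywords is a key of searchResults, so Python's RESULTS[kw] never raises and getD [] is exact here.
def searchPick (matched : PySem.Set String) : List String → Option (List String)
  | [] => none
  | kw :: rest =>
    if PySem.Set.contains matched kw then some (PySem.Dict.getD searchResults kw [])
    else searchPick matched rest

-- Port of B's first loop: scan every position i of the lowered query, adding each
-- keyword that starts at i to the matched set. Python's q.startswith(kw, i) with
-- 0 <= i has no PySem primitive; it is ported by hand as startswith on drop i.toNat,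
-- which is exact there (q.startswith(kw, i) == q[i:].startswith(kw) for 0 <= i).
def searchScan (q : String) : PySem.Set String :=
  (PySem.List.pyRange 0 (PySem.Str.len q) 1).foldl
    (fun m i =>
      searchKeywords.foldl
        (fun m kw =>
          if PySem.Chars.startswith (q.toList.drop i.toNat) kw.toList then PySem.Set.add m kw
          else m) m)
    PySem.Set.empty

-- Port of B: the position scan, then the priority lookup, else the generic results.
def search_alt (query : String) : List String :=
  let q := PySem.Str.lower query
  let matched := searchScan q
  match searchPick matched searchKeywords with
  | some results => results
  | none =>
    ["Result 1 for query: " ++ PySem.Str.slice query none (some 50),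
     "Result 2 for query: " ++ PySem.Str.slice query none (some 50)]

-- ===== PRECONDITION & SPEC =====
def Spec_search (query : String) (out : List String) : Prop := out = search_alt query
instance (query : String) (out : List String) : Decidable (Spec_search query out) := by unfold Spec_search; infer_instance

-- ===== CLAIM (what is proved, stated in full; the proofs are below) =====
def Claim_equal_search : Prop := ∀ (query : String), Dom_search query → Spec_search query (search query)

-- ===== LEMMAS AND PROOFS =====

-- membership after the inner (per-position) fold over the keyword list
theorem mem_inner_fold (P : String → Bool) (ks : List String) (m : PySem.Set String) (x : String) :
    x ∈ ks.foldl (fun m kw => if P kw then PySem.Set.add m kw else m) m ↔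
      x ∈ m ∨ (x ∈ ks ∧ P x = true) := by
  induction ks generalizing m with
  | nil => simp
  | cons k rest ih =>
    simp only [List.foldl_cons, List.mem_cons]
    by_cases hk : P k = true
    · rw [if_pos hk, ih]
      simp only [PySem.Set.mem_add]
      constructor
      · rintro ((h | rfl) | ⟨h, hp⟩)
        · exact Or.inl h
        · exact Or.inr ⟨Or.inl rfl, hk⟩
        · exact Or.inr ⟨Or.inr h, hp⟩
      · rintro (h | ⟨(rfl | h), hp⟩)
        · exact Or.inl (Or.inl h)
        · exact Or.inl (Or.inr rfl)
        · exact Or.inr ⟨h, hp⟩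
    · rw [if_neg hk, ih]
      constructor
      · rintro (h | ⟨h, hp⟩)
        · exact Or.inl h
        · exact Or.inr ⟨Or.inr h, hp⟩
      · rintro (h | ⟨(rfl | h), hp⟩)
        · exact Or.inl h
        · exact absurd hp hk
        · exact Or.inr ⟨h, hp⟩

-- membership after the outer fold over the index list
theorem mem_outer_fold (Q : Int → String → Bool) (is : List Int) (m : PySem.Set String) (x : String) :
    x ∈ is.foldl (fun m i => searchKeywords.foldl
        (fun m kw => if Q i kw then PySem.Set.add m kw else m) m) m ↔
      x ∈ m ∨ (x ∈ searchKeywords ∧ ∃ i ∈ is, Q i x = true) := by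
  induction is generalizing m with
  | nil => simp
  | cons i rest ih =>
    simp only [List.foldl_cons, ih, mem_inner_fold, List.mem_cons]
    constructor
    · rintro ((h | ⟨hk, hq⟩) | ⟨hk, j, hj, hq⟩)
      · exact Or.inl h
      · exact Or.inr ⟨hk, i, Or.inl rfl, hq⟩
      · exact Or.inr ⟨hk, j, Or.inr hj, hq⟩
    · rintro (h | ⟨hk, j, (rfl | hj), hq⟩)
      · exact Or.inl (Or.inl h)
      · exact Or.inl (Or.inr ⟨hk, hq⟩)
      · exact Or.inr ⟨hk, j, hj, hq⟩

-- the position scan matches kw somewhere iff kw is a substring of q (for nonempty kw)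
theorem scan_iff_isIn (q kw : String) (hkw : kw.toList ≠ []) :
    (∃ i ∈ PySem.List.pyRange 0 (PySem.Str.len q) 1,
        PySem.Chars.startswith (q.toList.drop i.toNat) kw.toList = true) ↔
      PySem.Str.isIn kw q = true := by
  rw [PySem.Str.isIn_iff_infix, ← PySem.Chars.isIn_iff_infix,
      ← PySem.Chars.exists_prefix_drop_iff_isIn]
  constructor
  · rintro ⟨i, hi, hs⟩
    rw [PySem.List.mem_pyRange_one] at hi
    refine ⟨i.toNat, ?_⟩
    have := (PySem.Chars.startswith_iff _ _).mp hs
    simpa using this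
  · rintro ⟨j, hj⟩
    by_cases hlen : j < q.toList.length
    · refine ⟨(j : Int), ?_, ?_⟩
      · rw [PySem.List.mem_pyRange_one]
        refine ⟨by exact_mod_cast Nat.zero_le j, ?_⟩
        simp only [PySem.Str.len_eq]
        exact_mod_cast hlen
      · refine (PySem.Chars.startswith_iff _ _).mpr ?_
        simpa using hj
    · exfalso
      rw [List.drop_eq_nil_of_le (by omega)] at hj
      exact hkw (List.prefix_nil.mp hj)

-- the matched set contains kw iff kw is a substring of q (for keywords)
theorem contains_searchScan (q kw : String) (hk : kw ∈ searchKeywords) (hkw : kw.toList ≠ []) :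
    PySem.Set.contains (searchScan q) kw = PySem.Str.isIn kw q := by
  rw [Bool.eq_iff_iff, PySem.Set.contains_iff, searchScan,
    mem_outer_fold (fun i k => PySem.Chars.startswith (q.toList.drop i.toNat) k.toList)]
  simp only [PySem.Set.empty, List.not_mem_nil, false_or]
  constructor
  · rintro ⟨_, hex⟩
    exact (scan_iff_isIn q kw hkw).mp hex
  · intro hin
    exact ⟨hk, (scan_iff_isIn q kw hkw).mpr hin⟩

-- ===== VERDICT (by name: the statement is the Claim_ definition above) =====
theorem search_spec : Claim_equal_search := by
  intro query _
  unfold Spec_search search search_alt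
  set ql := PySem.Str.lower query with hql
  have e1 := contains_searchScan ql "raft" (by simp [searchKeywords]) (by decide)
  have e2 := contains_searchScan ql "paxos" (by simp [searchKeywords]) (by decide)
  have e3 := contains_searchScan ql "statehouse" (by simp [searchKeywords]) (by decide)
  have e4 := contains_searchScan ql "rust" (by simp [searchKeywords]) (by decide)
  have e5 := contains_searchScan ql "python" (by simp [searchKeywords]) (by decide)
  have e6 := contains_searchScan ql "code" (by simp [searchKeywords]) (by decide)
  have e7 := contains_searchScan ql "programming" (by simp [searchKeywords]) (by decide)
  simp only [searchKeywords, searchPick, e1, e2, e3, e4, e5, e6, e7,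
    List.any_cons, List.any_nil, Bool.or_false]
  by_cases h1 : PySem.Str.isIn "raft" ql = true
  · rw [if_pos h1, if_pos h1]; rfl
  · rw [if_neg h1, if_neg h1]
    by_cases h2 : PySem.Str.isIn "paxos" ql = true
    · rw [if_pos h2, if_pos h2]; rfl
    · rw [if_neg h2, if_neg h2]
      by_cases h3 : PySem.Str.isIn "statehouse" ql = true
      · rw [if_pos h3, if_pos h3]; rfl
      · rw [if_neg h3, if_neg h3]
        by_cases h4 : PySem.Str.isIn "rust" ql = true
        · rw [if_pos h4, if_pos h4]; rfl
        · rw [if_neg h4, if_neg h4]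
          by_cases h5 : PySem.Str.isIn "python" ql = true
          · have hor : (PySem.Str.isIn "python" ql ||
                (PySem.Str.isIn "code" ql || PySem.Str.isIn "programming" ql)) = true := by
              rw [h5, Bool.true_or]
            rw [if_pos hor, if_pos h5]; rfl
          · by_cases h6 : PySem.Str.isIn "code" ql = true
            · have hor : (PySem.Str.isIn "python" ql ||
                  (PySem.Str.isIn "code" ql || PySem.Str.isIn "programming" ql)) = true := by
                simp only [Bool.not_eq_true] at h5
                rw [h5, h6, Bool.true_or, Bool.false_or]
              rw [if_pos hor, if_neg h5, if_pos h6]; rfl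
            · by_cases h7 : PySem.Str.isIn "programming" ql = true
              · have hor : (PySem.Str.isIn "python" ql ||
                    (PySem.Str.isIn "code" ql || PySem.Str.isIn "programming" ql)) = true := by
                  simp only [Bool.not_eq_true] at h5 h6
                  rw [h5, h6, h7, Bool.false_or, Bool.false_or]
                rw [if_pos hor, if_neg h5, if_neg h6, if_pos h7]; rfl
              · have hor : ¬ ((PySem.Str.isIn "python" ql ||
                    (PySem.Str.isIn "code" ql || PySem.Str.isIn "programming" ql)) = true) := by
                  simp only [Bool.not_eq_true] at h5 h6 h7
                  rw [h5, h6, h7]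
                  decide
                rw [if_neg hor, if_neg h5, if_neg h6, if_neg h7]
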